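-- pv_equiv track=rewrite | github.com/Lingotek/filesystem-connector | python2/ltk/actions.py | choice_mapper
-- ===== SOURCE A (Python) =====
-- def choice_mapper(info):
--     mapper = {}
--     import operator
--
--     #sorted_info = sorted(info.iteritems(), key=operator.itemgetter(1))
--     sorted_info = sorted(info.items(), key = operator.itemgetter(1))
--
--     index = 0
--     for entry in sorted_info:
--         if entry[0] and entry[1]:
--             mapper[index] = {entry[0]: entry[1]}
--             index += 1
--     for k,v in mapper.items():
--         try:
--             for values in v:
--                 print ('({0}) {1} ({2})'.format(k, v[values], values))
--         except UnicodeEncodeError: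
--             continue
--     return mapper
-- ===== SOURCE B (Python) =====
-- def choice_mapper(info):
--     # Group keys by value, then emit buckets in sorted-value order.
--     buckets = {}
--     for k, v in info.items():
--         if k and v:
--             buckets.setdefault(v, []).append(k)
--     mapper = {}
--     index = 0
--     for v in sorted(buckets):
--         for k in buckets[v]:
--             try:
--                 print('({0}) {1} ({2})'.format(index, v, k))
--             except UnicodeEncodeError:
--                 pass
--             mapper[index] = {k: v}
--             index += 1
--     return mapper
-- ===== Notes on version B (the rewrite author's own statement) =====
-- stated objective: alternative
-- what changed: B replaces A's stable sort of all items plus index-counter dict loop with a grouping algorithm: it buckets keys by value in a dict of lists, sorts only the distinct values, and emits the buckets in value order (stability comes from bucket append order, not from the sort).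
import Mathlib
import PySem

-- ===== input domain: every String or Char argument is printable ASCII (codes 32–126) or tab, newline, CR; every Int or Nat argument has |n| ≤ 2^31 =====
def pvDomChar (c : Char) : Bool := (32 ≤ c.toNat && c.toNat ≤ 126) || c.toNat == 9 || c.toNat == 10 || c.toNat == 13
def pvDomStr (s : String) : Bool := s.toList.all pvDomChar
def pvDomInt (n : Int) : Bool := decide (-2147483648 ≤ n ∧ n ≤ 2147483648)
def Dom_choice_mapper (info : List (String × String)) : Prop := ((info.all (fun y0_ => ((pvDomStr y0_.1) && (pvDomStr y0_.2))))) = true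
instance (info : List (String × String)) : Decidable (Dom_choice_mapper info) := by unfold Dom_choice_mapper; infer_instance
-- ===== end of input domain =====

-- B groups keys into value-buckets and sorts only the distinct values, instead of A's stable
-- sort of all items plus index-counter loop (equivalence is about the RETURN value; the
-- prints of both Pythons coincide and are not modelled).

-- ===== PORT A =====
def choice_mapper (info : List (String × String)) : List (Int × List (String × String)) :=
  -- sorted_info = sorted(info.items(), key=operator.itemgetter(1))
  let sorted_info := PySem.List.sorted info (fun e => e.2) false
  -- index = 0; for entry in sorted_info: if entry[0] and entry[1]: mapper[index] = {entry[0]: entry[1]}; index += 1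
  let st := sorted_info.foldl
    (fun (st : PySem.Dict Int (List (String × String)) × Int) entry =>
      if entry.1 ≠ "" ∧ entry.2 ≠ "" then
        (st.1.insert st.2 [(entry.1, entry.2)], st.2 + 1)
      else st)
    (PySem.Dict.empty, 0)
  -- (the second loop only prints; it does not change mapper)  return mapper
  st.1.items

-- ===== PORT B =====
def choice_mapper_alt (info : List (String × String)) : List (Int × List (String × String)) :=
  -- for k, v in info.items(): if k and v: buckets.setdefault(v, []).append(k)
  let buckets := info.foldl
    (fun (d : PySem.Dict String (List String)) e =>
      if e.1 ≠ "" ∧ e.2 ≠ "" then d.modify e.2 [] (fun ks => ks ++ [e.1]) else d)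
    PySem.Dict.empty
  -- mapper = {}; index = 0; for v in sorted(buckets): for k in buckets[v]: mapper[index] = {k: v}; index += 1
  let st := (PySem.List.sorted buckets.keys (fun v => v) false).foldl
    (fun (st : PySem.Dict Int (List (String × String)) × Int) v =>
      (buckets.getD v []).foldl
        (fun (st : PySem.Dict Int (List (String × String)) × Int) k =>
          (st.1.insert st.2 [(k, v)], st.2 + 1))
        st)
    (PySem.Dict.empty, 0)
  st.1.items

-- ===== PRECONDITION & SPEC =====
def Spec_choice_mapper (info : List (String × String)) (out : List (Int × List (String × String))) : Prop := out = choice_mapper_alt info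
instance (info : List (String × String)) (out : List (Int × List (String × String))) : Decidable (Spec_choice_mapper info out) := by unfold Spec_choice_mapper; infer_instance

-- ===== CLAIM (what is proved, stated in full; the proofs are below) =====
def Claim_equal_choice_mapper : Prop := ∀ (info : List (String × String)), Dom_choice_mapper info → Spec_choice_mapper info (choice_mapper info)

-- ===== LEMMAS AND PROOFS =====

-- A's/B's counter loop over any entry list, specialised: items = old items ++ enumerate
theorem pv_counter_loop (l : List (String × String)) :
    ∀ (d : PySem.Dict Int (List (String × String))) (i : Int),
      (∀ k ∈ d.keys, k < i) →
      (l.foldl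
        (fun (st : PySem.Dict Int (List (String × String)) × Int) e =>
          (st.1.insert st.2 [(e.1, e.2)], st.2 + 1))
        (d, i)).1.items =
      d.items ++ (PySem.List.enumerate l i).map (fun p => (p.1, [(p.2.1, p.2.2)])) := by
  induction l with
  | nil => intro d i _; simp
  | cons e t ih =>
    intro d i hinv
    have hnc : d.contains i = false := by
      by_contra hc
      rw [Bool.not_eq_false] at hc
      exact absurd (hinv i ((PySem.Dict.contains_iff_mem_keys d i).mp hc)) (lt_irrefl i)
    have hinv' : ∀ k ∈ (d.insert i [(e.1, e.2)]).keys, k < i + 1 := by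
      intro k hk
      rw [PySem.Dict.mem_keys_insert] at hk
      rcases hk with rfl | hk
      · omega
      · exact lt_trans (hinv k hk) (by omega)
    simp only [List.foldl_cons]
    rw [ih _ _ hinv', PySem.Dict.items_insert_of_not_contains d _ hnc,
      PySem.List.enumerate_cons]
    simp

theorem pv_counter_loop_if (l : List (String × String)) (d : PySem.Dict Int (List (String × String))) (i : Int) :
    (l.foldl
      (fun (st : PySem.Dict Int (List (String × String)) × Int) entry =>
        if entry.1 ≠ "" ∧ entry.2 ≠ "" then
          (st.1.insert st.2 [(entry.1, entry.2)], st.2 + 1)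
        else st)
      (d, i)) =
    ((l.filter (fun e => decide (e.1 ≠ "") && decide (e.2 ≠ ""))).foldl
      (fun (st : PySem.Dict Int (List (String × String)) × Int) e =>
        (st.1.insert st.2 [(e.1, e.2)], st.2 + 1))
      (d, i)) := by
  rw [List.foldl_filter]
  congr 1
  funext st e
  by_cases h : e.1 ≠ "" ∧ e.2 ≠ "" <;> simp [h]

-- insertBy (key-<) preserves key-sortedness (≤)
theorem pv_pairwise_insertBy {α κ : Type} [LinearOrder κ] (key : α → κ) (x : α) :
    ∀ (ys : List α), ys.Pairwise (fun a b => key a ≤ key b) →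
      (PySem.List.insertBy (fun a b => decide (key a < key b)) x ys).Pairwise
        (fun a b => key a ≤ key b) := by
  intro ys
  induction ys with
  | nil => intro _; simp [PySem.List.insertBy]
  | cons y t ih =>
    intro h
    rw [List.pairwise_cons] at h
    by_cases hb : key x < key y
    · simp only [PySem.List.insertBy, hb, decide_true, if_true]
      refine List.Pairwise.cons ?_ (List.Pairwise.cons h.1 h.2)
      intro z hz
      rcases List.mem_cons.mp hz with rfl | hz
      · exact le_of_lt hb
      · exact le_of_lt (lt_of_lt_of_le hb (h.1 z hz))
    · simp only [PySem.List.insertBy, hb, decide_false]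
      refine List.Pairwise.cons ?_ (ih h.2)
      intro z hz
      rcases (PySem.List.mem_insertBy _ _ _ _).mp hz with rfl | hz
      · exact le_of_not_gt hb
      · exact h.1 z hz

-- filtering commutes with a single stable insertion into a key-sorted list
theorem pv_filter_insertBy {α κ : Type} [LinearOrder κ] (key : α → κ) (p : α → Bool) (x : α) :
    ∀ (ys : List α), ys.Pairwise (fun a b => key a ≤ key b) →
      (PySem.List.insertBy (fun a b => decide (key a < key b)) x ys).filter p =
        if p x then PySem.List.insertBy (fun a b => decide (key a < key b)) x (ys.filter p)
        else ys.filter p := by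
  intro ys
  induction ys with
  | nil => intro _; by_cases hp : p x <;> simp [PySem.List.insertBy, hp]
  | cons y t ih =>
    intro h
    rw [List.pairwise_cons] at h
    by_cases hb : key x < key y
    · have hall : ∀ z ∈ t.filter p, (fun a b => decide (key a < key b)) x z = true := by
        intro z hz
        simp only [decide_eq_true_eq]
        exact lt_of_lt_of_le hb (h.1 z (List.mem_of_mem_filter hz))
      simp only [PySem.List.insertBy, hb, decide_true, if_true]
      by_cases hp : p x
      · by_cases hpy : p y
        · simp [hp, hpy, PySem.List.insertBy, hb]
        · simp only [List.filter_cons, hp, hpy, if_true, if_false, Bool.false_eq_true]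
          cases hft : t.filter p with
          | nil => simp [PySem.List.insertBy]
          | cons z zt =>
            have := hall z (by rw [hft]; exact List.mem_cons_self)
            simp only [PySem.List.insertBy, this, if_true]
      · by_cases hpy : p y <;> simp [hp, hpy]
    · simp only [PySem.List.insertBy, hb, decide_false, Bool.false_eq_true, if_false]
      by_cases hpy : p y
      · simp only [List.filter_cons, hpy, if_true]
        rw [ih h.2]
        by_cases hp : p x
        · simp only [hp, if_true, PySem.List.insertBy, hb, decide_false,
            Bool.false_eq_true, if_false]
        · simp [hp]
      · simp only [List.filter_cons, hpy, Bool.false_eq_true, if_false]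
        exact ih h.2

-- filtering commutes with the whole insertion-sort fold
theorem pv_filter_foldl_insertBy {α κ : Type} [LinearOrder κ] (key : α → κ) (p : α → Bool) :
    ∀ (xs acc : List α), acc.Pairwise (fun a b => key a ≤ key b) →
      (xs.foldl (fun acc x => PySem.List.insertBy (fun a b => decide (key a < key b)) x acc) acc).filter p =
        (xs.filter p).foldl (fun acc x => PySem.List.insertBy (fun a b => decide (key a < key b)) x acc) (acc.filter p) := by
  intro xs
  induction xs with
  | nil => intro acc _; simp
  | cons x t ih =>
    intro acc hacc
    simp only [List.foldl_cons, List.filter_cons]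
    rw [ih _ (pv_pairwise_insertBy key x acc hacc),
        pv_filter_insertBy key p x acc hacc]
    by_cases hp : p x <;> simp [hp]

-- sorting then filtering = filtering then sorting (stable sort, any predicate)
theorem pv_sorted_filter {α κ : Type} [LinearOrder κ] (key : α → κ) (p : α → Bool) (xs : List α) :
    (PySem.List.sorted xs key false).filter p = PySem.List.sorted (xs.filter p) key false := by
  rw [PySem.List.sorted_eq_foldl_insertBy, PySem.List.sorted_eq_foldl_insertBy]
  simpa using pv_filter_foldl_insertBy key p xs [] (List.Pairwise.nil)

-- a non-decreasing list whose minimum present key is v splits: the key-v elements are a prefix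
theorem pv_split_min {α κ : Type} [LinearOrder κ] [DecidableEq κ] (key : α → κ) (v : κ) :
    ∀ (ys : List α), ys.Pairwise (fun a b => key a ≤ key b) → (∀ y ∈ ys, v ≤ key y) →
      ys = ys.filter (fun e => key e == v) ++ ys.filter (fun e => !(key e == v)) := by
  intro ys
  induction ys with
  | nil => intro _ _; simp
  | cons y t ih =>
    intro hp hmin
    rw [List.pairwise_cons] at hp
    by_cases hy : key y = v
    · simp only [List.filter_cons, hy, beq_self_eq_true, if_true, Bool.not_true,
        Bool.false_eq_true, if_false, List.cons_append]
      exact congrArg (y :: ·) (ih hp.2 (fun z hz => hmin z (List.mem_cons_of_mem y hz)))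
    · have hvy : v < key y := lt_of_le_of_ne (hmin y List.mem_cons_self) (Ne.symm hy)
      have ht1 : t.filter (fun e => key e == v) = [] := by
        rw [List.filter_eq_nil_iff]
        intro z hz
        have : v < key z := lt_of_lt_of_le hvy (hp.1 z hz)
        simp only [Bool.not_eq_true, beq_eq_false_iff_ne]
        exact fun he => absurd he (ne_of_gt this)
      have ht2 : t.filter (fun e => !(key e == v)) = t := by
        rw [List.filter_eq_self]
        intro z hz
        have : v < key z := lt_of_lt_of_le hvy (hp.1 z hz)
        simp [ne_of_gt this]
      simp [hy, ht1, ht2]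

-- a key-sorted list is the concatenation of its key-filters over any strictly sorted cover
theorem pv_concat_filters {α κ : Type} [LinearOrder κ] [DecidableEq κ] (key : α → κ) :
    ∀ (vs : List κ) (ys : List α), ys.Pairwise (fun a b => key a ≤ key b) →
      vs.Pairwise (· < ·) → (∀ y ∈ ys, key y ∈ vs) →
      ys = vs.flatMap (fun v => ys.filter (fun e => key e == v)) := by
  intro vs
  induction vs with
  | nil =>
    intro ys _ _ hcov
    cases ys with
    | nil => simp
    | cons y t => exact absurd (hcov y List.mem_cons_self) (List.not_mem_nil)
  | cons v rest ih =>
    intro ys hp hvs hcov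
    rw [List.pairwise_cons] at hvs
    have hmin : ∀ y ∈ ys, v ≤ key y := by
      intro y hy
      rcases List.mem_cons.mp (hcov y hy) with he | hr
      · exact le_of_eq he.symm
      · exact le_of_lt (hvs.1 _ hr)
    have hsplit := pv_split_min key v ys hp hmin
    set ys' := ys.filter (fun e => !(key e == v)) with hys'
    have hp' : ys'.Pairwise (fun a b => key a ≤ key b) := List.Pairwise.filter _ hp
    have hcov' : ∀ y ∈ ys', key y ∈ rest := by
      intro y hy
      have hmem := List.mem_of_mem_filter hy
      have hne : ¬(key y == v) = true := by
        have := List.of_mem_filter hy; simpa using this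
      rcases List.mem_cons.mp (hcov y hmem) with he | hr
      · exact absurd (by simp [he]) hne
      · exact hr
    have hstep := ih ys' hp' hvs.2 hcov'
    have hfilter_eq : ∀ v' ∈ rest, ys.filter (fun e => key e == v') = ys'.filter (fun e => key e == v') := by
      intro v' hv'
      have hne : v ≠ v' := ne_of_lt (hvs.1 _ hv')
      rw [hys', List.filter_filter]
      apply List.filter_congr
      intro z _
      by_cases hz : key z = v'
      · simp [hz, Ne.symm hne]
      · simp [hz]
    calc ys = ys.filter (fun e => key e == v) ++ ys' := hsplit
      _ = ys.filter (fun e => key e == v) ++ rest.flatMap (fun v' => ys'.filter (fun e => key e == v')) := by rw [← hstep]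
      _ = ys.filter (fun e => key e == v) ++ rest.flatMap (fun v' => ys.filter (fun e => key e == v')) := by
            congr 1
            apply List.flatMap_congr
            intro v' hv'
            exact (hfilter_eq v' hv').symm
      _ = (v :: rest).flatMap (fun v' => ys.filter (fun e => key e == v')) := by simp


-- B's bucket-building loop with its truthiness test = the same loop over the filtered list
theorem pv_bucket_loop_if (l : List (String × String)) (d : PySem.Dict String (List String)) :
    (l.foldl
      (fun (d : PySem.Dict String (List String)) e =>
        if e.1 ≠ "" ∧ e.2 ≠ "" then d.modify e.2 [] (fun ks => ks ++ [e.1]) else d)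
      d) =
    ((l.filter (fun e => decide (e.1 ≠ "") && decide (e.2 ≠ ""))).foldl
      (fun (d : PySem.Dict String (List String)) e => d.modify e.2 [] (fun ks => ks ++ [e.1]))
      d) := by
  rw [List.foldl_filter]
  congr 1
  funext d' e
  by_cases h : e.1 ≠ "" ∧ e.2 ≠ "" <;> simp [h]

-- B's nested emit loop = the flat counter loop over the concatenated (key, value) pairs
theorem pv_nested_loop (vs : List String) :
    ∀ (g : String → List String) (st : PySem.Dict Int (List (String × String)) × Int),
      (vs.foldl
        (fun (st : PySem.Dict Int (List (String × String)) × Int) v =>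
          (g v).foldl
            (fun (st : PySem.Dict Int (List (String × String)) × Int) k =>
              (st.1.insert st.2 [(k, v)], st.2 + 1))
            st)
        st) =
      ((vs.flatMap (fun v => (g v).map (fun k => (k, v)))).foldl
        (fun (st : PySem.Dict Int (List (String × String)) × Int) e =>
          (st.1.insert st.2 [(e.1, e.2)], st.2 + 1))
        st) := by
  induction vs with
  | nil => intro g st; simp
  | cons v t ih =>
    intro g st
    simp only [List.foldl_cons, List.flatMap_cons, List.foldl_append, ih, List.foldl_map]

-- a constant-key filtered list is already sorted
theorem pv_sorted_const_filter (l : List (String × String)) (v : String) :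
    PySem.List.sorted (l.filter (fun e => e.2 == v)) (fun e => e.2) false =
      l.filter (fun e => e.2 == v) := by
  apply PySem.List.sorted_eq_self_of_pairwise
  apply List.pairwise_of_forall_mem_list
  intro a ha b hb
  have ha' : a.2 = v := by simpa using List.of_mem_filter ha
  have hb' : b.2 = v := by simpa using List.of_mem_filter hb
  rw [ha', hb']

-- ===== VERDICT (by name: the statement is the Claim_ definition above) =====
theorem choice_mapper_spec : Claim_equal_choice_mapper := by
  intro info _
  unfold Spec_choice_mapper choice_mapper choice_mapper_alt
  dsimp only
  -- A side
  rw [pv_counter_loop_if, pv_counter_loop _ PySem.Dict.empty 0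
      (by intro k hk; simp [PySem.Dict.keys_empty] at hk)]
  rw [pv_sorted_filter (fun e : String × String => e.2)
      (fun e => decide (e.1 ≠ "") && decide (e.2 ≠ "")) info]
  -- B side
  rw [pv_bucket_loop_if, pv_nested_loop]
  set fs := info.filter (fun e => decide (e.1 ≠ "") && decide (e.2 ≠ "")) with hfs
  have hswap : (fs.foldl
      (fun (d : PySem.Dict String (List String)) e => d.modify e.2 [] (fun ks => ks ++ [e.1]))
      PySem.Dict.empty) =
      ((fs.map (fun e => (e.2, e.1))).foldl
        (fun (d : PySem.Dict String (List String)) q => d.modify q.1 [] (fun ks => ks ++ [q.2]))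
        PySem.Dict.empty) := by
    rw [List.foldl_map]
  have hkeys : (fs.foldl
      (fun (d : PySem.Dict String (List String)) e => d.modify e.2 [] (fun ks => ks ++ [e.1]))
      PySem.Dict.empty).keys = PySem.Set.ofList (fs.map (fun e => e.2)) := by
    rw [PySem.Dict.keys_foldl_modify_key]
    rw [PySem.Dict.keys_empty]
    rfl
  have hgetD : ∀ v, (fs.foldl
      (fun (d : PySem.Dict String (List String)) e => d.modify e.2 [] (fun ks => ks ++ [e.1]))
      PySem.Dict.empty).getD v [] = (fs.filter (fun e => e.2 == v)).map (fun e => e.1) := by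
    intro v
    rw [hswap, PySem.Dict.getD_foldl_modify_append, List.filter_map]
    simp [PySem.Dict.getD_empty, List.map_map, Function.comp_def]
  simp only [hkeys, hgetD]
  rw [pv_counter_loop _ PySem.Dict.empty 0
      (by intro k hk; simp [PySem.Dict.keys_empty] at hk)]
  -- identify the two enumerated lists
  have hinner : ∀ v : String, ((fs.filter (fun e => e.2 == v)).map (fun e => e.1)).map
      (fun k => (k, v)) = fs.filter (fun e => e.2 == v) := by
    intro v
    rw [List.map_map]
    calc (fs.filter (fun e => e.2 == v)).map ((fun k => (k, v)) ∘ (fun e => e.1))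
        = (fs.filter (fun e => e.2 == v)).map id := by
          apply List.map_congr_left
          intro e he
          have : e.2 = v := by simpa using List.of_mem_filter he
          simp [Function.comp, ← this]
      _ = fs.filter (fun e => e.2 == v) := List.map_id _
  have hcover : ∀ y ∈ PySem.List.sorted fs (fun e : String × String => e.2) false,
      y.2 ∈ PySem.List.sorted (PySem.Set.ofList (fs.map (fun e => e.2))) (fun v => v) false := by
    intro y hy
    rw [PySem.List.mem_sorted] at hy ⊢
    rw [PySem.Set.mem_ofList]
    exact List.mem_map_of_mem hy
  have hlist : PySem.List.sorted fs (fun e : String × String => e.2) false =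
      (PySem.List.sorted (PySem.Set.ofList (fs.map (fun e => e.2))) (fun v => v) false).flatMap
        (fun v => ((fs.filter (fun e => e.2 == v)).map (fun e => e.1)).map (fun k => (k, v))) := by
    have hmain := pv_concat_filters (fun e : String × String => e.2)
      (PySem.List.sorted (PySem.Set.ofList (fs.map (fun e => e.2))) (fun v => v) false)
      (PySem.List.sorted fs (fun e => e.2) false)
      (PySem.List.sorted_pairwise _ _)
      (PySem.List.sorted_ofList_pairwise_lt _)
      hcover
    rw [hmain]
    apply List.flatMap_congr
    intro v _
    rw [hinner v, pv_sorted_filter (fun e : String × String => e.2) (fun e => e.2 == v) fs,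
      pv_sorted_const_filter]
  rw [hlist]
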